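-- pv_equiv track=rewrite | github.com/therhd/overthewire_advent_2019 | northpole_airwaves/symbols_decode.py | decode_pair_symbols
-- ===== SOURCE A (Python) =====
-- def decode_pair_symbols(symbols: str, one: str, zero: str):
--     symbol_pair = ''
--     bits = ''
--     for symbol in list(symbols):
--         symbol_pair = '{}{}'.format(symbol_pair, symbol)
--         if len(symbol_pair) == 2:
--             if symbol_pair == zero:
--                 bits = '{}{}'.format(bits, '0')
--             if symbol_pair == one:
--                 bits = '{}{}'.format(bits, '1')
--             symbol_pair = ''
--     return bits
-- ===== SOURCE B (Python) =====
-- def decode_pair_symbols(symbols: str, one: str, zero: str):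
--     it = iter(symbols)
--     out = []
--     for a, b in zip(it, it):
--         pair = a + b
--         if pair == zero:
--             out.append('0')
--         if pair == one:
--             out.append('1')
--     return ''.join(out)
-- ===== Notes on version B (the rewrite author's own statement) =====
-- stated objective: idiomatic
-- what changed: Replaces the char-by-char scan with a running symbol_pair accumulator and repeated quadratic string concatenation by pairwise iteration via zip(it, it), collecting bits in a list and joining once.
import Mathlib
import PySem

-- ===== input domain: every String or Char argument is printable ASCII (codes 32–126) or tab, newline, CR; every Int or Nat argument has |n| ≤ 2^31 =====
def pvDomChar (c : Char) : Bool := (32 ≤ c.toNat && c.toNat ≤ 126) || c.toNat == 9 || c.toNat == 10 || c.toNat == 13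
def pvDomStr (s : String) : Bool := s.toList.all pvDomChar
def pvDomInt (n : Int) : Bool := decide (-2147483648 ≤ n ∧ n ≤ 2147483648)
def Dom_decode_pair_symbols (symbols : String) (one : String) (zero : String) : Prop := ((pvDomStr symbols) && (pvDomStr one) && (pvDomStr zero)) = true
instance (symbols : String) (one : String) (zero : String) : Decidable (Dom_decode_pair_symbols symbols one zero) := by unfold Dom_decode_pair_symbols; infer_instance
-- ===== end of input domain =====

-- B replaces the char-by-char accumulator scan with direct pairwise grouping (zip of an iterator with itself) and a single join; objective: idiomatic.


-- ===== PORT A =====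
-- state = (symbol_pair, bits) as lists of chars; string equality 'symbol_pair == zero'
-- is exactly equality of the char lists (String.toList is injective), noted in a comment.
def stepA (one : String) (zero : String) (st : List Char × List Char) (symbol : Char) :
    List Char × List Char :=
  let sp := st.1 ++ [symbol]
  if sp.length = 2 then
    let bits := if sp = zero.toList then st.2 ++ ['0'] else st.2
    let bits := if sp = one.toList then bits ++ ['1'] else bits
    ([], bits)
  else (sp, st.2)

def decode_pair_symbols (symbols : String) (one : String) (zero : String) : String :=
  String.mk (symbols.toList.foldl (stepA one zero) ([], [])).2

-- ===== PORT B =====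
-- zip(it, it): consume the chars two at a time; emit '0'/'1' per pair; join once.
def altGo (one : List Char) (zero : List Char) : List Char → List Char
  | a :: b :: rest =>
      (if [a, b] = zero then ['0'] else []) ++ (if [a, b] = one then ['1'] else [])
        ++ altGo one zero rest
  | _ => []

def decode_pair_symbols_alt (symbols : String) (one : String) (zero : String) : String :=
  String.mk (altGo one.toList zero.toList symbols.toList)

-- ===== PRECONDITION & SPEC =====
def Spec_decode_pair_symbols (symbols : String) (one : String) (zero : String) (out : String) : Prop := out = decode_pair_symbols_alt symbols one zero
instance (symbols : String) (one : String) (zero : String) (out : String) : Decidable (Spec_decode_pair_symbols symbols one zero out) := by unfold Spec_decode_pair_symbols; infer_instance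

-- ===== CLAIM (what is proved, stated in full; the proofs are below) =====
def Claim_equal_decode_pair_symbols : Prop := ∀ (symbols : String) (one : String) (zero : String), Dom_decode_pair_symbols symbols one zero → Spec_decode_pair_symbols symbols one zero (decode_pair_symbols symbols one zero)

-- ===== LEMMAS AND PROOFS =====
lemma fold_stepA_spec (one zero : String) :
    ∀ (l : List Char) (bits : List Char),
      (l.foldl (stepA one zero) ([], bits)).2 = bits ++ altGo one.toList zero.toList l := by
  intro l
  induction l using altGo.induct with
  | case1 a b rest ih =>
      intro bits
      have h1 : stepA one zero ([], bits) a = ([a], bits) := by simp [stepA]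
      have h2 : stepA one zero ([a], bits) b =
          ([], if [a, b] = one.toList then
                 (if [a, b] = zero.toList then bits ++ ['0'] else bits) ++ ['1']
               else if [a, b] = zero.toList then bits ++ ['0'] else bits) := by
        simp [stepA]
      simp only [List.foldl, h1, h2, ih, altGo]
      split_ifs <;> simp
  | case2 l h =>
      intro bits
      cases l with
      | nil => simp [altGo]
      | cons a t =>
          cases t with
          | nil => simp [altGo, List.foldl, stepA]
          | cons b r => exact absurd rfl (h a b r)

-- ===== VERDICT (by name: the statement is the Claim_ definition above) =====
theorem decode_pair_symbols_spec : Claim_equal_decode_pair_symbols := by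
  intro symbols one zero _
  unfold Spec_decode_pair_symbols decode_pair_symbols decode_pair_symbols_alt
  rw [fold_stepA_spec]
  simp
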